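-- pv_equiv track=rewrite | github.com/andythenorth/iron-horse | src/graphics_processor/units.py | make_recolour_table
-- ===== SOURCE A (Python) =====
-- def make_recolour_table(recolour_map):
--     table = []
--     for i in range(256):
--         if i in recolour_map.keys():
--             table.append(recolour_map[i])
--         else:
--             table.append(i)
--     return table
-- ===== SOURCE B (Python) =====
-- def make_recolour_table(recolour_map):
--     table = list(range(256))
--     for key, value in recolour_map.items():
--         if 0 <= key < 256:
--             table[key] = value
--     return table
-- ===== Notes on version B (the rewrite author's own statement) =====
-- stated objective: simpler
-- what changed: Instead of scanning all 256 indices and testing each for membership in the map, B builds the identity palette once and then iterates only over the override map's items, overwriting in-range entries in place.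
import Mathlib
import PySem

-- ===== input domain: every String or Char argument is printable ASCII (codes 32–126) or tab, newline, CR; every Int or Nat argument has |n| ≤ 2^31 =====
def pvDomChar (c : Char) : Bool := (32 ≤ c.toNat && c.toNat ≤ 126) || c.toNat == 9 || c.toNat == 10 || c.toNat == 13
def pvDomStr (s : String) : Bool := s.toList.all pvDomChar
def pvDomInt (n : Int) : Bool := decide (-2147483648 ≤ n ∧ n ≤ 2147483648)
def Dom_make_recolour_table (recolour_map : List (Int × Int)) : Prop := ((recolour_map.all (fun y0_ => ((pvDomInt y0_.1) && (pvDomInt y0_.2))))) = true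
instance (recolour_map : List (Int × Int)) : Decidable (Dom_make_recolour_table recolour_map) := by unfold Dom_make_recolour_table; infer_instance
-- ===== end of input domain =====

-- B builds the identity palette once, then patches it in place from the override map;
-- A scans all 256 indices and does a membership test + lookup per index. Same return value.

-- ===== PORT A =====
-- A's argument is a Python dict; its association list is `recolour_map`, the dict itself is `d`.
def make_recolour_table (recolour_map : List (Int × Int)) : List Int :=
  (PySem.List.pyRange 0 256 1).foldl
    (fun table i =>
      if (PySem.Dict.ofList recolour_map).contains i then
        table ++ [(PySem.Dict.ofList recolour_map).getD i 0]   -- recolour_map[i]; guarded by contains, so the default 0 is never used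
      else table ++ [i]) []

-- ===== PORT B =====
def make_recolour_table_alt (recolour_map : List (Int × Int)) : List Int :=
  recolour_map.foldl
    (fun table p => if 0 ≤ p.1 ∧ p.1 < 256 then table.set p.1.toNat p.2 else table)
    ((List.range 256).map (fun n : Nat => (n : Int)))

-- ===== PRECONDITION & SPEC =====
def Spec_make_recolour_table (recolour_map : List (Int × Int)) (out : List Int) : Prop := out = make_recolour_table_alt recolour_map
instance (recolour_map : List (Int × Int)) (out : List Int) : Decidable (Spec_make_recolour_table recolour_map out) := by unfold Spec_make_recolour_table; infer_instance

-- ===== CLAIM (what is proved, stated in full; the proofs are below) =====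
def Claim_equal_make_recolour_table : Prop := ∀ (recolour_map : List (Int × Int)), Dom_make_recolour_table recolour_map → Spec_make_recolour_table recolour_map (make_recolour_table recolour_map)

-- ===== LEMMAS AND PROOFS =====

-- last binding of key k in the association list (Python-dict semantics: later keys overwrite)
def pvLook (m : List (Int × Int)) (k : Int) : Option Int :=
  m.foldl (fun acc p => if p.1 = k then some p.2 else acc) none

theorem pvLook_append_singleton (m : List (Int × Int)) (p : Int × Int) (k : Int) :
    pvLook (m ++ [p]) k = if p.1 = k then some p.2 else pvLook m k := by
  simp [pvLook, List.foldl_append]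

theorem ofList_append_singleton (m : List (Int × Int)) (p : Int × Int) :
    PySem.Dict.ofList (m ++ [p]) = (PySem.Dict.ofList m).insert p.1 p.2 := by
  simp [PySem.Dict.ofList, PySem.Dict.update, List.foldl_append]

theorem get?_ofList_eq_pvLook (m : List (Int × Int)) (k : Int) :
    (PySem.Dict.ofList m).get? k = pvLook m k := by
  induction m using List.reverseRecOn with
  | nil => rfl
  | append_singleton m p ih =>
      rw [ofList_append_singleton, pvLook_append_singleton, PySem.Dict.get?_insert]
      by_cases h : p.1 = k
      · simp [h]
      · simp [h, Ne.symm h, ih]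

theorem set_map_range (N j : Nat) (v : Int) (f : Nat → Int) :
    ((List.range N).map f).set j v = (List.range N).map (fun n => if n = j then v else f n) := by
  apply List.ext_getElem
  · simp
  · intro n h1 h2
    simp only [List.getElem_set, List.getElem_map, List.getElem_range]
    by_cases h : n = j
    · simp [h]
    · rw [if_neg (fun he => h he.symm), if_neg h]

theorem alt_eq_map (m : List (Int × Int)) :
    make_recolour_table_alt m = (List.range 256).map (fun n : Nat => (pvLook m (n : Int)).getD (n : Int)) := by
  induction m using List.reverseRecOn with
  | nil =>
      unfold make_recolour_table_alt
      rw [List.foldl_nil]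
      rfl
  | append_singleton m p ih =>
      unfold make_recolour_table_alt at ih ⊢
      rw [List.foldl_append, List.foldl_cons, List.foldl_nil, ih]
      by_cases h : 0 ≤ p.1 ∧ p.1 < 256
      · rw [if_pos h]
        rw [set_map_range 256 p.1.toNat p.2 _]
        apply List.map_congr_left
        intro n hn
        have hn' : n < 256 := List.mem_range.mp hn
        rw [pvLook_append_singleton]
        by_cases hk : p.1 = (n : Int)
        · have hn' : n = p.1.toNat := by omega
          rw [if_pos hk, if_pos hn', Option.getD_some]
        · have hn' : n ≠ p.1.toNat := by omega
          rw [if_neg hk, if_neg hn']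
      · rw [if_neg h]
        apply List.map_congr_left
        intro n hn
        have hn' : n < 256 := List.mem_range.mp hn
        rw [pvLook_append_singleton]
        have hk : ¬ p.1 = (n : Int) := by omega
        rw [if_neg hk]

theorem a_eq_map (m : List (Int × Int)) :
    make_recolour_table m = (List.range 256).map (fun n : Nat => (pvLook m (n : Int)).getD (n : Int)) := by
  unfold make_recolour_table
  have hbody : (fun (table : List Int) (i : Int) =>
      if (PySem.Dict.ofList m).contains i then table ++ [(PySem.Dict.ofList m).getD i 0]
      else table ++ [i])
      = fun table i => table ++ [if (PySem.Dict.ofList m).contains i then (PySem.Dict.ofList m).getD i 0 else i] := by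
    funext t i; split <;> rfl
  rw [hbody, PySem.List.foldl_append_singleton_eq_map, List.nil_append,
      PySem.List.pyRange_one]
  have h256 : ((256 : Int) - 0).toNat = 256 := by decide
  rw [h256, List.map_map]
  apply List.map_congr_left
  intro n hn
  show (if (PySem.Dict.ofList m).contains ((0 : Int) + n) then (PySem.Dict.ofList m).getD ((0 : Int) + n) 0 else (0 : Int) + n) = _
  rw [zero_add, PySem.Dict.contains_eq_isSome_get?, PySem.Dict.getD_eq_get?_getD,
      get?_ofList_eq_pvLook]
  cases h : pvLook m (n : Int) with
  | none => simp
  | some v => simp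

-- ===== VERDICT (by name: the statement is the Claim_ definition above) =====
theorem make_recolour_table_spec : Claim_equal_make_recolour_table := by
  intro m _
  unfold Spec_make_recolour_table
  rw [a_eq_map, alt_eq_map]
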